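-- pv_equiv track=rewrite | github.com/cmc333333/regulations-parser | regparser/tree/depth/rules.py | _level_and_children
-- ===== SOURCE A (Python) =====
-- def _level_and_children(elements):
--     """Split a list of elements into elements on the current level (i.e.
--     that share the same depth as the first element) and segmented children
--     (children of each of those elements)"""
--     if not elements:        # Base Case
--         return [], []
--     level_depth = elements[0][2]
--     level = []
--     grouped_children = []
--     children = []
--
--     for el in elements:
--         if level_depth == el[2]:
--             level.append(el)
--             if children:
--                 grouped_children.append(children)
--             children = []
--         else:
--             children.append(el)
--     if children:
--         grouped_children.append(children)
--
--     return level, grouped_children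
-- ===== SOURCE B (Python) =====
-- def _level_and_children(elements):
--     """Split elements into the current level and grouped children by scanning
--     maximal runs of equal depth-predicate, one run at a time."""
--     if not elements:
--         return [], []
--     level_depth = elements[0][2]
--     level = []
--     grouped_children = []
--     i, n = 0, len(elements)
--     while i < n:
--         on_level = elements[i][2] == level_depth
--         j = i
--         while j < n and (elements[j][2] == level_depth) == on_level:
--             j += 1
--         if on_level:
--             level.extend(elements[i:j])
--         else:
--             grouped_children.append(elements[i:j])
--         i = j
--     return level, grouped_children
-- ===== Notes on version B (the rewrite author's own statement) =====
-- stated objective: alternative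
-- what changed: Replaced A's element-at-a-time loop with a mutable children accumulator and end-of-loop flush by a run-at-a-time scan that peels each maximal run of equal depth-predicate and extends level or appends a child group per run.
import Mathlib
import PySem

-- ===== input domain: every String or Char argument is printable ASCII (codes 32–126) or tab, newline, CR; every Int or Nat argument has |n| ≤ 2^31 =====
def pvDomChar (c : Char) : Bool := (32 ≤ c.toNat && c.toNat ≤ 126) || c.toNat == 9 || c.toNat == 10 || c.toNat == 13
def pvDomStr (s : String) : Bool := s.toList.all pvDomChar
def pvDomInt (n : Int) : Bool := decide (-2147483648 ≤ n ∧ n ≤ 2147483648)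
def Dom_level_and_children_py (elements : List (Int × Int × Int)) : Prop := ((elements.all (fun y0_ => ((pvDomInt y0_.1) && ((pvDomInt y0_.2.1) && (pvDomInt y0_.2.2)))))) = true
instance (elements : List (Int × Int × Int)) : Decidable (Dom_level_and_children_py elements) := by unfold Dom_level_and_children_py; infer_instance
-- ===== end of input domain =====

-- B replaces A's element-at-a-time loop with a children accumulator and flush by a
-- run-at-a-time scan over maximal runs of the depth predicate (objective: alternative).


-- ===== PORT A =====
-- fold state: (level, grouped_children, children), exactly A's three accumulators
def pvStepA (d : Int) (st : List (Int × Int × Int) × List (List (Int × Int × Int)) × List (Int × Int × Int))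
    (el : Int × Int × Int) :
    List (Int × Int × Int) × List (List (Int × Int × Int)) × List (Int × Int × Int) :=
  if d == el.2.2 then
    (st.1 ++ [el], (if st.2.2 ≠ [] then st.2.1 ++ [st.2.2] else st.2.1), [])
  else
    (st.1, st.2.1, st.2.2 ++ [el])

def level_and_children_py (elements : List (Int × Int × Int)) :
    (List (Int × Int × Int)) × (List (List (Int × Int × Int))) :=
  match elements with
  | [] => ([], [])
  | e0 :: _ =>
    let s := elements.foldl (pvStepA e0.2.2) ([], [], [])
    (s.1, if s.2.2 ≠ [] then s.2.1 ++ [s.2.2] else s.2.1)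

-- ===== PORT B =====
-- run-at-a-time scan: peel the maximal run agreeing with the head on the depth predicate,
-- extend level / append to grouped, continue on the remainder
def pvRunsB (d : Int) (xs : List (Int × Int × Int))
    (level : List (Int × Int × Int)) (grouped : List (List (Int × Int × Int))) :
    (List (Int × Int × Int)) × (List (List (Int × Int × Int))) :=
  match xs with
  | [] => (level, grouped)
  | x :: rest =>
    if x.2.2 == d then
      pvRunsB d ((x :: rest).dropWhile (fun el => el.2.2 == d))
        (level ++ (x :: rest).takeWhile (fun el => el.2.2 == d)) grouped
    else
      pvRunsB d ((x :: rest).dropWhile (fun el => !(el.2.2 == d)))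
        level (grouped ++ [(x :: rest).takeWhile (fun el => !(el.2.2 == d))])
termination_by xs.length
decreasing_by
  · simp only [List.dropWhile_cons]
    rename_i h
    simp only [h, if_pos]
    have := List.length_dropWhile_le (fun el => el.2.2 == d) rest
    simp only [List.length_cons]; omega
  · simp only [List.dropWhile_cons]
    rename_i h
    simp only [h, Bool.not_false, if_pos]
    have := List.length_dropWhile_le (fun el => !(el.2.2 == d)) rest
    simp only [List.length_cons]; omega

def level_and_children_py_alt (elements : List (Int × Int × Int)) :
    (List (Int × Int × Int)) × (List (List (Int × Int × Int))) :=
  match elements with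
  | [] => ([], [])
  | e0 :: _ => pvRunsB e0.2.2 elements [] []

-- ===== PRECONDITION & SPEC =====
def Spec_level_and_children_py (elements : List (Int × Int × Int)) (out : (List (Int × Int × Int)) × (List (List (Int × Int × Int)))) : Prop := out = level_and_children_py_alt elements
instance (elements : List (Int × Int × Int)) (out : (List (Int × Int × Int)) × (List (List (Int × Int × Int)))) : Decidable (Spec_level_and_children_py elements out) := by unfold Spec_level_and_children_py; infer_instance

-- ===== CLAIM (what is proved, stated in full; the proofs are below) =====
def Claim_equal_level_and_children_py : Prop := ∀ (elements : List (Int × Int × Int)), Dom_level_and_children_py elements → Spec_level_and_children_py elements (level_and_children_py elements)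

-- ===== LEMMAS AND PROOFS =====

-- A's finalization (the trailing "if children: grouped_children.append(children)")
def pvFinishA (s : List (Int × Int × Int) × List (List (Int × Int × Int)) × List (Int × Int × Int)) :
    (List (Int × Int × Int)) × (List (List (Int × Int × Int))) :=
  (s.1, if s.2.2 ≠ [] then s.2.1 ++ [s.2.2] else s.2.1)

-- A's fold over a run of level elements from empty children just extends level
theorem pvFoldLevelRun (d : Int) (run : List (Int × Int × Int))
    (hrun : ∀ el ∈ run, el.2.2 = d) (L : List (Int × Int × Int)) (G : List (List (Int × Int × Int))) :
    run.foldl (pvStepA d) (L, G, []) = (L ++ run, G, []) := by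
  induction run generalizing L with
  | nil => simp
  | cons x xs ih =>
    have hx : x.2.2 = d := hrun x (by simp)
    simp only [List.foldl_cons, pvStepA, hx, beq_self_eq_true, if_true, ne_eq,
      not_true_eq_false, ite_false]
    rw [ih (fun el h => hrun el (by simp [h]))]
    simp

-- A's fold over a run of child elements just extends children
theorem pvFoldChildRun (d : Int) (run : List (Int × Int × Int))
    (hrun : ∀ el ∈ run, el.2.2 ≠ d) (L : List (Int × Int × Int)) (G : List (List (Int × Int × Int)))
    (c : List (Int × Int × Int)) :
    run.foldl (pvStepA d) (L, G, c) = (L, G, c ++ run) := by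
  induction run generalizing c with
  | nil => simp
  | cons x xs ih =>
    have hx : x.2.2 ≠ d := hrun x (by simp)
    simp only [List.foldl_cons, pvStepA]
    rw [if_neg (by simp [Ne.symm hx])]
    rw [ih (fun el h => hrun el (by simp [h]))]
    simp

-- main invariant: A's fold-then-flush from (L, G, []) equals B's run scan
theorem pvMain (d : Int) (xs : List (Int × Int × Int))
    (L : List (Int × Int × Int)) (G : List (List (Int × Int × Int))) :
    pvFinishA (xs.foldl (pvStepA d) (L, G, [])) = pvRunsB d xs L G := by
  match xs with
  | [] => simp [pvFinishA, pvRunsB]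
  | x :: rest =>
    rw [pvRunsB]
    by_cases hx : x.2.2 = d
    · rw [if_pos (by simp [hx])]
      have hmem : ∀ el ∈ (x :: rest).takeWhile (fun el => el.2.2 == d), el.2.2 = d := by
        intro el h
        have := List.mem_takeWhile_imp h
        simpa using this
      conv_lhs => rw [← List.takeWhile_append_dropWhile
        (p := fun el : Int × Int × Int => el.2.2 == d) (l := x :: rest)]
      rw [List.foldl_append, pvFoldLevelRun d _ hmem]
      have hlt : ((x :: rest).dropWhile (fun el => el.2.2 == d)).length < (x :: rest).length := by
        simp only [List.dropWhile_cons, show (x.2.2 == d) = true by simp [hx], if_pos]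
        have := List.length_dropWhile_le (fun el : Int × Int × Int => el.2.2 == d) rest
        simp only [List.length_cons]; omega
      exact pvMain d _ (L ++ (x :: rest).takeWhile (fun el => el.2.2 == d)) G
    · rw [if_neg (by simp [hx])]
      set q : (Int × Int × Int) → Bool := fun el => !(el.2.2 == d) with hq
      have hmem : ∀ el ∈ (x :: rest).takeWhile q, el.2.2 ≠ d := by
        intro el h
        have := List.mem_takeWhile_imp h
        simpa [hq] using this
      have hne : (x :: rest).takeWhile q ≠ [] := by
        simp [hq, hx]
      conv_lhs => rw [← List.takeWhile_append_dropWhile (p := q) (l := x :: rest)]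
      rw [List.foldl_append, pvFoldChildRun d _ hmem L G [], List.nil_append]
      have hlt : ((x :: rest).dropWhile q).length < (x :: rest).length := by
        rw [hq]
        simp only [List.dropWhile_cons, show (!(x.2.2 == d)) = true by simp [hx], if_pos]
        have := List.length_dropWhile_le (fun el : Int × Int × Int => !(el.2.2 == d)) rest
        simp only [List.length_cons]; omega
      match hrest : (x :: rest).dropWhile q with
      | [] =>
        simp [pvFinishA, pvRunsB, hne]
      | e :: t =>
        have he : q e = false := by
          have := List.head?_dropWhile_not q (x :: rest)
          rw [hrest] at this
          simpa using this
        have hed : e.2.2 = d := by simpa [hq] using he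
        have hstep : pvStepA d (L, G, (x :: rest).takeWhile q) e
            = (L ++ [e], G ++ [(x :: rest).takeWhile q], []) := by
          simp [pvStepA, hed, hne]
        have hstep' : pvStepA d (L, G ++ [(x :: rest).takeWhile q], []) e
            = (L ++ [e], G ++ [(x :: rest).takeWhile q], []) := by
          simp [pvStepA, hed]
        rw [List.foldl_cons, hstep]
        have := pvMain d (e :: t) L (G ++ [(x :: rest).takeWhile q])
        rw [List.foldl_cons, hstep'] at this
        rw [this, ← hrest]
termination_by xs.length
decreasing_by
  · exact hlt
  · rw [hrest] at hlt; exact hlt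

-- ===== VERDICT (by name: the statement is the Claim_ definition above) =====
theorem level_and_children_py_spec : Claim_equal_level_and_children_py := by
  intro elements _
  unfold Spec_level_and_children_py
  match elements with
  | [] => rfl
  | e0 :: tl =>
    show pvFinishA ((e0 :: tl).foldl (pvStepA e0.2.2) ([], [], [])) = _
    rw [pvMain]
    rfl
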